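-- pv_equiv track=rewrite | github.com/foggy-projects/foggy-odoo-bridge | foggy_mcp/lib/foggy/dataset_model/engine/compose/schema/derive.py | _mask_string_literals
-- ===== SOURCE A (Python) =====
-- from typing import Dict, Iterable, List, Optional, Set, Tuple
--
-- def _mask_string_literals(text: str) -> str:
--     """Replace contents of single- / double-quoted string segments with
--     spaces so downstream identifier scanning skips them. Escapes (\\')
--     are handled simply: the escape char stays, the following char is
--     also masked."""
--     out = []
--     quote: Optional[str] = None
--     escaped = False
--     for ch in text:
--         if quote is None:
--             if ch in ("'", '"'):
--                 quote = ch
--                 out.append(" ")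
--             else:
--                 out.append(ch)
--         else:
--             if escaped:
--                 escaped = False
--                 out.append(" ")
--                 continue
--             if ch == "\\":
--                 escaped = True
--                 out.append(" ")
--             elif ch == quote:
--                 quote = None
--                 out.append(" ")
--             else:
--                 out.append(" ")
--     return "".join(out)
-- ===== SOURCE B (Python) =====
-- def _mask_string_literals(text: str) -> str:
--     """Span-based rewrite: copy verbatim runs up to the next quote, then scan
--     forward to the matching quote (a backslash consumes the following char)
--     and replace the whole span with spaces."""
--     n = len(text)
--     parts = []
--     i = 0
--     while i < n:
--         j = i
--         while j < n and text[j] not in "'\"":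
--             j += 1
--         parts.append(text[i:j])
--         if j >= n:
--             break
--         q = text[j]
--         k = j + 1
--         while k < n and text[k] != q:
--             if text[k] == "\\":
--                 k += 1
--             k += 1
--         end = min(k + 1, n)
--         parts.append(" " * (end - j))
--         i = end
--     return "".join(parts)
-- ===== Notes on version B (the rewrite author's own statement) =====
-- stated objective: alternative
-- what changed: Replaced A's per-character state machine (quote/escaped flags updated on every char) by a span-based rewrite: copy each verbatim run up to the next quote, then an inner scan finds the end of the quoted span (a backslash consumes the following char) and the whole span is replaced by an equal-length run of spaces.
import Mathlib
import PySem

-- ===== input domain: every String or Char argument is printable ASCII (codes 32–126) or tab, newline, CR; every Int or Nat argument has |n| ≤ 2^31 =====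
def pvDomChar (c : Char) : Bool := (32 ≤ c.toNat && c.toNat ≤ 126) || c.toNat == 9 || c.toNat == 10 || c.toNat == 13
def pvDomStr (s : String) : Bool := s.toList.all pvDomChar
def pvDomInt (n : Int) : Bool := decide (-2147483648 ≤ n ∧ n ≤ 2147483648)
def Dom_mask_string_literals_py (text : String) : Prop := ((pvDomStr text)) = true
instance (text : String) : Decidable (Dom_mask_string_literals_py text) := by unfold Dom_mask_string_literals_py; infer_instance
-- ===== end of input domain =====

-- B replaces A's per-character state machine by a span-based rewrite (copy verbatim run,
-- then scan the quoted span and mask it whole); objective: alternative decomposition.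

-- ===== PORT A =====
-- state: (out, quote, escaped), exactly A's loop state
def maskA_step (st : List Char × Option Char × Bool) (ch : Char) : List Char × Option Char × Bool :=
  match st with
  | (out, none, esc) =>
    if ch = '\'' ∨ ch = '"' then (out ++ [' '], some ch, esc)
    else (out ++ [ch], none, esc)
  | (out, some q, esc) =>
    if esc then (out ++ [' '], some q, false)
    else if ch = '\\' then (out ++ [' '], some q, true)
    else if ch = q then (out ++ [' '], none, false)
    else (out ++ [' '], some q, esc)

def mask_string_literals_py (text : String) : String :=
  String.mk (text.toList.foldl maskA_step ([], none, false)).1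

-- ===== PORT B =====
-- inner scan: length of the masked span after the opening quote, and the remainder
def maskB_inner (q : Char) : List Char → Nat × List Char
  | [] => (0, [])
  | c :: cs =>
    if c = q then (1, cs)
    else if c = '\\' then
      match cs with
      | [] => (1, [])
      | _ :: cs' => let r := maskB_inner q cs'; (r.1 + 2, r.2)
    else let r := maskB_inner q cs; (r.1 + 1, r.2)

theorem maskB_inner_len (q : Char) : ∀ cs : List Char, (maskB_inner q cs).2.length ≤ cs.length
  | [] => by simp [maskB_inner]
  | c :: cs => by
    rw [maskB_inner.eq_def]
    by_cases h1 : c = q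
    · simp [h1]
    · by_cases h2 : c = '\\'
      · subst h2
        match cs with
        | [] => simp [h1]
        | d :: cs' =>
          have := maskB_inner_len q cs'
          simp [h1]
          omega
      · have := maskB_inner_len q cs
        simp [h1, h2]
        omega

def maskB_outer : List Char → List Char
  | [] => []
  | c :: cs =>
    if c = '\'' ∨ c = '"' then
      let r := maskB_inner c cs
      List.replicate (r.1 + 1) ' ' ++ maskB_outer r.2
    else c :: maskB_outer cs
termination_by cs => cs.length
decreasing_by
  · exact Nat.lt_succ_of_le (maskB_inner_len c cs)
  · simp

def mask_string_literals_py_alt (text : String) : String :=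
  String.mk (maskB_outer text.toList)

-- ===== PRECONDITION & SPEC =====
def Spec_mask_string_literals_py (text : String) (out : String) : Prop := out = mask_string_literals_py_alt text
instance (text : String) (out : String) : Decidable (Spec_mask_string_literals_py text out) := by unfold Spec_mask_string_literals_py; infer_instance

-- ===== CLAIM (what is proved, stated in full; the proofs are below) =====
def Claim_equal_mask_string_literals_py : Prop := ∀ (text : String), Dom_mask_string_literals_py text → Spec_mask_string_literals_py text (mask_string_literals_py text)

-- ===== LEMMAS AND PROOFS =====

theorem maskA_step_shift (out : List Char) (q : Option Char) (e : Bool) (c : Char) :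
    maskA_step (out, q, e) c
      = (out ++ (maskA_step ([], q, e) c).1, (maskA_step ([], q, e) c).2) := by
  cases q <;> simp only [maskA_step] <;> split_ifs <;> simp

theorem maskA_out_shift : ∀ (cs : List Char) (out : List Char) (q : Option Char) (e : Bool),
    (cs.foldl maskA_step (out, q, e)).1 = out ++ (cs.foldl maskA_step ([], q, e)).1
  | [], out, q, e => by simp
  | c :: cs, out, q, e => by
    simp only [List.foldl_cons, maskA_step_shift out q e c]
    rcases hm : maskA_step ([], q, e) c with ⟨w, q', e'⟩
    rw [maskA_out_shift cs (out ++ w) q' e', maskA_out_shift cs w q' e']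
    simp

theorem mask_main : ∀ (n : Nat) (cs : List Char), cs.length ≤ n →
    (∀ out : List Char, (cs.foldl maskA_step (out, none, false)).1 = out ++ maskB_outer cs) ∧
    (∀ (out : List Char) (q : Char), (q = '\'' ∨ q = '"') →
      (cs.foldl maskA_step (out, some q, false)).1
        = out ++ (List.replicate (maskB_inner q cs).1 ' ' ++ maskB_outer (maskB_inner q cs).2)) := by
  intro n
  induction n with
  | zero =>
    intro cs h
    have hnil : cs = [] := List.eq_nil_of_length_eq_zero (Nat.le_zero.mp h)
    subst hnil
    constructor
    · intro out; simp [maskB_outer]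
    · intro out q _; simp [maskB_inner, maskB_outer]
  | succ n ih =>
    intro cs h
    cases cs with
    | nil =>
      constructor
      · intro out; simp [maskB_outer]
      · intro out q _; simp [maskB_inner, maskB_outer]
    | cons c cs =>
      simp only [List.length_cons] at h
      constructor
      · intro out
        simp only [List.foldl_cons]
        by_cases hq : c = '\'' ∨ c = '"'
        · have hstep : maskA_step (out, none, false) c = (out ++ [' '], some c, false) := by
            simp [maskA_step, hq]
          rw [hstep, (ih cs (by omega)).2 (out ++ [' ']) c hq]
          rw [maskB_outer]
          simp [hq, List.replicate_succ]
        · have hstep : maskA_step (out, none, false) c = (out ++ [c], none, false) := by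
            simp [maskA_step, hq]
          rw [hstep, (ih cs (by omega)).1 (out ++ [c])]
          rw [maskB_outer]
          simp [hq]
      · intro out q hq
        simp only [List.foldl_cons]
        by_cases h1 : c = q
        · have hq' : ¬ q = '\\' := by rcases hq with h' | h' <;> simp [h']
          have hstep : maskA_step (out, some q, false) c = (out ++ [' '], none, false) := by
            simp [maskA_step, h1, hq']
          rw [hstep, (ih cs (by omega)).1 (out ++ [' '])]
          rw [maskB_inner.eq_def]
          simp [h1, List.replicate_succ]
        · by_cases h2 : c = '\\'
          · cases cs with
            | nil =>
              have hstep : maskA_step (out, some q, false) c = (out ++ [' '], some q, true) := by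
                simp [maskA_step, h2]
              simp only [List.foldl_nil, hstep]
              rw [maskB_inner.eq_def]
              subst h2
              have h1' : ¬ ('\\' : Char) = q := h1
              simp [h1', List.replicate_succ, maskB_outer]
            | cons d cs' =>
              have hstep : maskA_step (out, some q, false) c = (out ++ [' '], some q, true) := by
                simp [maskA_step, h2]
              have hstep2 : maskA_step (out ++ [' '], some q, true) d
                  = (out ++ [' ', ' '], some q, false) := by
                simp [maskA_step]
              simp only [List.foldl_cons, hstep, hstep2]
              rw [(ih cs' (by simp only [List.length_cons] at h; omega)).2 (out ++ [' ', ' ']) q hq]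
              subst h2
              have h1' : ¬ ('\\' : Char) = q := h1
              have hin : maskB_inner q ('\\' :: d :: cs')
                  = ((maskB_inner q cs').1 + 2, (maskB_inner q cs').2) := by
                rw [maskB_inner.eq_def]; simp [h1']
              rw [hin, show (maskB_inner q cs').1 + 2 = ((maskB_inner q cs').1 + 1) + 1 from rfl]
              simp [List.replicate_succ]
          · have hstep : maskA_step (out, some q, false) c = (out ++ [' '], some q, false) := by
              simp [maskA_step, h1, h2]
            rw [hstep, (ih cs (by omega)).2 (out ++ [' ']) q hq]
            have hin : maskB_inner q (c :: cs)
                = ((maskB_inner q cs).1 + 1, (maskB_inner q cs).2) := by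
              rw [maskB_inner.eq_def]; simp [h1, h2]
            rw [hin]
            simp [List.replicate_succ]

-- ===== VERDICT (by name: the statement is the Claim_ definition above) =====
theorem mask_string_literals_py_spec : Claim_equal_mask_string_literals_py := by
  intro text _
  unfold Spec_mask_string_literals_py mask_string_literals_py mask_string_literals_py_alt
  have h := (mask_main text.toList.length text.toList le_rfl).1 []
  simp at h
  rw [h]
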